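-- pv_equiv track=rewrite | github.com/lucasmotareis/Laborat-rio-e-Programa--o | Aula 3/funcoes.py | numPerfeito
-- ===== SOURCE A (Python) =====
-- def numPerfeito(num):
--     if num % 2 == 0:
--         i=0
--         numero_perfeito = 0
--         while num != numero_perfeito and numero_perfeito<=num:
--             numero_perfeito = (2**(i-1))*(2**i - 1)
--             i+=1
--         if num == numero_perfeito:
--             return True
--         else:
--             return False
--     else:
--         return False
-- ===== SOURCE B (Python) =====
-- def _isqrt(n):
--     # Newton's method integer square root (floor); no imports, as A imports none.
--     if n == 0:
--         return 0
--     x = n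
--     y = (x + 1) // 2
--     while y < x:
--         x = y
--         y = (x + n // x) // 2
--     return x
--
-- def numPerfeito(num):
--     # Even guard, then closed-form test: num is of the form 2**(i-1)*(2**i - 1)
--     # iff 8*num+1 is a perfect square whose root r gives m = (1+r)//2 a power of two.
--     if num % 2 != 0:
--         return False
--     d = 8 * num + 1
--     if d < 0:
--         return False
--     r = _isqrt(d)
--     if r * r != d:
--         return False
--     m = (1 + r) // 2
--     return m >= 1 and (m & (m - 1)) == 0
-- ===== Notes on version B (the rewrite author's own statement) =====
-- stated objective: alternative
-- what changed: Replaces A's upward linear search through the candidate even-perfect-number values by a closed-form arithmetic test: a perfect-square check on eight-times-num-plus-one via a hand-written Newton integer square root, followed by a power-of-two bit test on the derived root.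
import Mathlib
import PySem

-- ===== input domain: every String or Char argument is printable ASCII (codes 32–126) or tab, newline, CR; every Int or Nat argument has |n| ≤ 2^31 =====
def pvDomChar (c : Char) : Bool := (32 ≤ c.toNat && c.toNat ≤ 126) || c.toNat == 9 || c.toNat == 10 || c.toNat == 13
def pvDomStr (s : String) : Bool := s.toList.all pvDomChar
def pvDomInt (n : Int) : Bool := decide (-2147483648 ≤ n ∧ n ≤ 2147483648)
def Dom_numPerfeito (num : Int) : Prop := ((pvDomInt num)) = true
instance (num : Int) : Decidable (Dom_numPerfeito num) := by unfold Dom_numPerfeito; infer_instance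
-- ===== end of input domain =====

-- B replaces A's linear upward search through the candidates 2^(i-1)*(2^i-1) by a closed-form
-- arithmetic test (8*num+1 a perfect square whose root yields a power of two), alternative algorithm.

-- ===== PORT A =====
-- A's while loop.  The fuel 20 is only a totality guard: for |num| ≤ 2^31 the candidate value
-- exceeds num within 19 iterations, so the port computes exactly A's loop on the whole domain.
-- At i = 0 Python computes the float (2**(-1))*(2**0-1) = 0.5*0 = 0.0, which compares equal to
-- the integer 0; it is ported as the integer 0 (exact: same comparison results).
def perfLoop (fuel : Nat) (num : Int) (i : Nat) (nm : Int) : Int :=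
  match fuel with
  | 0 => nm
  | f + 1 =>
    if num ≠ nm ∧ nm ≤ num then
      perfLoop f num (i + 1) (if i = 0 then 0 else 2 ^ (i - 1) * ((2 : Int) ^ i - 1))
    else nm

def numPerfeito (num : Int) : Bool :=
  if PySem.Int.mod num 2 = 0 then num == perfLoop 20 num 0 0 else false

-- ===== PORT B =====
-- Source B's hand-written Newton integer square root (Source B imports nothing, as A imports nothing).
-- The fuel n+1 is only a totality guard: x strictly decreases each iteration, so it never runs out.
def isqrtLoop (fuel n x y : Nat) : Nat :=
  match fuel with
  | 0 => x
  | f + 1 => if y < x then isqrtLoop f n y ((y + n / y) / 2) else x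

def isqrtB (n : Nat) : Nat :=
  if n = 0 then 0 else isqrtLoop (n + 1) n n ((n + 1) / 2)

def numPerfeito_alt (num : Int) : Bool :=
  if ¬ PySem.Int.mod num 2 = 0 then false
  else
    -- d = 8*num + 1
    if 8 * num + 1 < 0 then false
    else
      -- from here on d ≥ 0, so Python's int arithmetic is Nat arithmetic (d.toNat is exact)
      -- r = _isqrt(d); if r*r != d: return False
      if isqrtB (8 * num + 1).toNat * isqrtB (8 * num + 1).toNat ≠ (8 * num + 1).toNat then false
      else
        -- m = (1 + r) // 2 ; return m >= 1 and (m & (m - 1)) == 0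
        decide (1 ≤ (1 + isqrtB (8 * num + 1).toNat) / 2 ∧
          ((1 + isqrtB (8 * num + 1).toNat) / 2 &&& ((1 + isqrtB (8 * num + 1).toNat) / 2 - 1)) = 0)

-- ===== PRECONDITION & SPEC =====
def Spec_numPerfeito (num : Int) (out : Bool) : Prop := out = numPerfeito_alt num
instance (num : Int) (out : Bool) : Decidable (Spec_numPerfeito num out) := by unfold Spec_numPerfeito; infer_instance

-- ===== CLAIM (what is proved, stated in full; the proofs are below) =====
def Claim_equal_numPerfeito : Prop := ∀ (num : Int), Dom_numPerfeito num → Spec_numPerfeito num (numPerfeito num)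

-- ===== LEMMAS AND PROOFS =====

-- the value A's loop assigns at iteration i (Python's float 0.0 at i = 0 is the integer 0)
def candA (j : Nat) : Int := if j = 0 then 0 else 2 ^ (j - 1) * ((2 : Int) ^ j - 1)

-- if A's loop ever returns num itself, num was the initial accumulator or one of the candidates
theorem perfLoop_eq_num (fuel : Nat) (num : Int) :
    ∀ i nm, perfLoop fuel num i nm = num → nm = num ∨ ∃ j, num = candA j := by
  induction fuel with
  | zero => intro i nm h; exact Or.inl h
  | succ f ih =>
    intro i nm h
    by_cases hc : num ≠ nm ∧ nm ≤ num
    · simp only [perfLoop, if_pos hc] at h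
      rcases ih (i + 1) _ h with h' | h'
      · exact Or.inr ⟨i, h'.symm⟩
      · exact Or.inr h'
    · simp only [perfLoop, if_neg hc] at h
      exact Or.inl h

-- an even num ≤ 2^31 that is none of the 16 reachable candidate values is no candidate at all
theorem candA_ne (num : Int) (j : Nat) (hub : num ≤ 2147483648) (hm2 : num % 2 = 0)
    (h0 : num ≠ 0) (h2 : num ≠ 6) (h3 : num ≠ 28) (h4 : num ≠ 120)
    (h5 : num ≠ 496) (h6 : num ≠ 2016) (h7 : num ≠ 8128) (h8 : num ≠ 32640)
    (h9 : num ≠ 130816) (h10 : num ≠ 523776) (h11 : num ≠ 2096128) (h12 : num ≠ 8386560)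
    (h13 : num ≠ 33550336) (h14 : num ≠ 134209536) (h15 : num ≠ 536854528)
    (h16 : num ≠ 2147450880) : num ≠ candA j := by
  intro hj
  by_cases hj18 : j ≤ 17
  · interval_cases j <;> norm_num [candA] at hj <;> omega
  · have hj1 : j ≠ 0 := by omega
    have e1 : (2 : Int) ^ 17 ≤ 2 ^ (j - 1) := pow_le_pow_right₀ (by norm_num) (by omega)
    have e2 : (2 : Int) ^ 18 ≤ 2 ^ j := pow_le_pow_right₀ (by norm_num) (by omega)
    have e3 : (2 : Int) ^ 17 * ((2 : Int) ^ 18 - 1) ≤ 2 ^ (j - 1) * ((2 : Int) ^ j - 1) := by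
      apply mul_le_mul e1 (by omega) (by norm_num) (by positivity)
    simp only [candA, if_neg hj1] at hj
    norm_num at e3
    omega

-- m > 0 with m & (m-1) == 0 is a power of two (bit-level induction)
theorem land_pred_pow2 (m : Nat) : 0 < m → m &&& (m - 1) = 0 → ∃ k, m = 2 ^ k := by
  induction m using Nat.strong_induction_on with
  | _ m ih =>
    intro hpos h
    rcases Nat.even_or_odd m with he | ho
    · obtain ⟨t, ht⟩ := he
      have ht2 : m = 2 * t := by omega
      have htpos : 0 < t := by omega
      have hth : t &&& (t - 1) = 0 := by
        apply Nat.eq_of_testBit_eq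
        intro j
        have hbit := congrArg (fun x => x.testBit (j + 1)) h
        simp only [Nat.testBit_land, Nat.zero_testBit] at hbit ⊢
        rw [Nat.testBit_add_one, Nat.testBit_add_one] at hbit
        have d1 : m / 2 = t := by omega
        have d2 : (m - 1) / 2 = t - 1 := by omega
        rw [d1, d2] at hbit
        exact hbit
      obtain ⟨k, hk⟩ := ih t (by omega) htpos hth
      exact ⟨k + 1, by rw [ht2, hk, pow_succ]; ring⟩
    · -- odd m: m &&& (m-1) = m - 1, so m - 1 = 0
      have hodd : m % 2 = 1 := Nat.odd_iff.mp ho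
      have key : m &&& (m - 1) = m - 1 := by
        apply Nat.eq_of_testBit_eq
        intro j
        cases j with
        | zero =>
          simp only [Nat.testBit_land, Nat.testBit_zero]
          have : (m - 1) % 2 = 0 := by omega
          simp [this]
        | succ j =>
          simp only [Nat.testBit_land]
          rw [Nat.testBit_add_one, Nat.testBit_add_one]
          have hd : (m - 1) / 2 = m / 2 := by omega
          rw [hd, Bool.and_self]
      exact ⟨0, by omega⟩

-- core of the soundness of B's closed-form test, with the square root abstracted to any r
theorem altB_core (num : Int) (r : Nat)
    (hub : num ≤ 2147483648) (hm2 : num % 2 = 0) (hnn : ¬ 8 * num + 1 < 0)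
    (hr : r * r = (8 * num + 1).toNat)
    (h0 : num ≠ 0) (h2 : num ≠ 6) (h3 : num ≠ 28) (h4 : num ≠ 120)
    (h5 : num ≠ 496) (h6 : num ≠ 2016) (h7 : num ≠ 8128) (h8 : num ≠ 32640)
    (h9 : num ≠ 130816) (h10 : num ≠ 523776) (h11 : num ≠ 2096128) (h12 : num ≠ 8386560)
    (h13 : num ≠ 33550336) (h14 : num ≠ 134209536) (h15 : num ≠ 536854528)
    (h16 : num ≠ 2147450880) :
    decide (1 ≤ (1 + r) / 2 ∧ ((1 + r) / 2 &&& ((1 + r) / 2 - 1)) = 0) = false := by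
  rw [decide_eq_false_iff_not]
  rintro ⟨h1, hbit⟩
  obtain ⟨k, hk⟩ := land_pred_pow2 _ (by omega) hbit
  -- bounds: r ≤ 131072 hence (1+r)/2 ≤ 65536 hence k ≤ 16
  have hNle : (8 * num + 1).toNat ≤ 17179869185 := by omega
  have hrle : r ≤ 131072 := by
    by_contra hgt
    push_neg at hgt
    have := Nat.mul_le_mul hgt hgt
    omega
  have hk16 : k ≤ 16 := by
    by_contra hgt
    push_neg at hgt
    have : 2 ^ 17 ≤ 2 ^ k := Nat.pow_le_pow_right (by norm_num) (by omega)
    omega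
  -- r is odd (r*r = 8*num+1 is odd), so r = 2*2^k - 1
  have hNodd : (8 * num + 1).toNat % 2 = 1 := by omega
  have hrodd : r % 2 = 1 := by
    rcases Nat.mod_two_eq_zero_or_one r with hp | hp
    · exfalso
      have hmm := Nat.mul_mod r r 2
      rw [hp] at hmm
      simp at hmm
      omega
    · exact hp
  have hrr : r = 2 * 2 ^ k - 1 := by omega
  subst hrr
  interval_cases k <;> norm_num at hr <;> omega

-- B returns false for any even num in the domain that is none of the 16 true values
theorem altB_false (num : Int)
    (hub : num ≤ 2147483648) (hmod : PySem.Int.mod num 2 = 0)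
    (h0 : num ≠ 0) (h2 : num ≠ 6) (h3 : num ≠ 28) (h4 : num ≠ 120)
    (h5 : num ≠ 496) (h6 : num ≠ 2016) (h7 : num ≠ 8128) (h8 : num ≠ 32640)
    (h9 : num ≠ 130816) (h10 : num ≠ 523776) (h11 : num ≠ 2096128) (h12 : num ≠ 8386560)
    (h13 : num ≠ 33550336) (h14 : num ≠ 134209536) (h15 : num ≠ 536854528)
    (h16 : num ≠ 2147450880) : numPerfeito_alt num = false := by
  have hm2 : num % 2 = 0 := by
    rwa [PySem.Int.mod_eq_emod_of_pos (by norm_num)] at hmod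
  unfold numPerfeito_alt
  rw [if_neg (not_not_intro hmod)]
  split_ifs with hd hr
  · rfl
  · rfl
  · push_neg at hr
    exact altB_core num (isqrtB (8 * num + 1).toNat) hub hm2 hd hr
      h0 h2 h3 h4 h5 h6 h7 h8 h9 h10 h11 h12 h13 h14 h15 h16

-- A returns false too: its loop never hits such a num
theorem portA_false (num : Int)
    (hub : num ≤ 2147483648) (hmod : PySem.Int.mod num 2 = 0)
    (h0 : num ≠ 0) (h2 : num ≠ 6) (h3 : num ≠ 28) (h4 : num ≠ 120)
    (h5 : num ≠ 496) (h6 : num ≠ 2016) (h7 : num ≠ 8128) (h8 : num ≠ 32640)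
    (h9 : num ≠ 130816) (h10 : num ≠ 523776) (h11 : num ≠ 2096128) (h12 : num ≠ 8386560)
    (h13 : num ≠ 33550336) (h14 : num ≠ 134209536) (h15 : num ≠ 536854528)
    (h16 : num ≠ 2147450880) : numPerfeito num = false := by
  have hm2 : num % 2 = 0 := by
    rwa [PySem.Int.mod_eq_emod_of_pos (by norm_num)] at hmod
  unfold numPerfeito
  rw [if_pos hmod, beq_eq_false_iff_ne]
  intro heq
  rcases perfLoop_eq_num 20 num 0 0 heq.symm with h | ⟨j, hj⟩
  · exact h0 h.symm
  · exact candA_ne num j hub hm2 h0 h2 h3 h4 h5 h6 h7 h8 h9 h10 h11 h12 h13 h14 h15 h16 hj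

-- ===== VERDICT (by name: the statement is the Claim_ definition above) =====
set_option maxHeartbeats 2000000 in
theorem numPerfeito_spec : Claim_equal_numPerfeito := by
  intro num hdom
  unfold Dom_numPerfeito pvDomInt at hdom
  rw [decide_eq_true_eq] at hdom
  unfold Spec_numPerfeito
  by_cases e0 : num = 0; · subst e0; decide
  by_cases e2 : num = 6; · subst e2; decide
  by_cases e3 : num = 28; · subst e3; decide
  by_cases e4 : num = 120; · subst e4; decide
  by_cases e5 : num = 496; · subst e5; decide
  by_cases e6 : num = 2016; · subst e6; decide
  by_cases e7 : num = 8128; · subst e7; decide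
  by_cases e8 : num = 32640; · subst e8; decide
  by_cases e9 : num = 130816; · subst e9; decide
  by_cases e10 : num = 523776; · subst e10; decide
  by_cases e11 : num = 2096128; · subst e11; decide
  by_cases e12 : num = 8386560; · subst e12; decide
  by_cases e13 : num = 33550336; · subst e13; decide
  by_cases e14 : num = 134209536; · subst e14; decide
  by_cases e15 : num = 536854528; · subst e15; decide
  by_cases e16 : num = 2147450880; · subst e16; decide
  by_cases hmod : PySem.Int.mod num 2 = 0
  · rw [portA_false num hdom.2 hmod e0 e2 e3 e4 e5 e6 e7 e8 e9 e10 e11 e12 e13 e14 e15 e16,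
       altB_false num hdom.2 hmod e0 e2 e3 e4 e5 e6 e7 e8 e9 e10 e11 e12 e13 e14 e15 e16]
  · unfold numPerfeito numPerfeito_alt
    rw [if_neg hmod, if_pos hmod]
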